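-- pv_equiv track=rewrite | github.com/MuhammedYasinOzdemirDev/Python-K-t-phaneler | Dosya İslemleri/2-HarfNotuHesaplayici.py | HarfNotuVer
-- ===== SOURCE A (Python) =====
-- def HarfNotuVer(liste):
--     newliste = []
--     for i in liste:
--         if i > 90:
--             newliste.append("AA")
--         elif i > 75:
--             newliste.append("BB")
--         elif i > 60:
--             newliste.append("CC")
--         elif i > 45:
--             newliste.append("DD")
--         elif i > 30:
--             newliste.append("FD")
--         else:
--             newliste.append("FF")
--     return newliste
-- ===== SOURCE B (Python) =====
-- import bisect
--
-- _BOUNDS = [30, 45, 60, 75, 90]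
-- _LETTERS = ["FF", "FD", "DD", "CC", "BB", "AA"]
--
-- def HarfNotuVer(liste):
--     return [_LETTERS[bisect.bisect_left(_BOUNDS, i)] for i in liste]
-- ===== Notes on version B (the rewrite author's own statement) =====
-- stated objective: idiomatic
-- what changed: Replaces the 6-way if/elif ladder with a binary-search lookup (bisect_left) into a sorted threshold table with a parallel letter table, built as a list comprehension.
import Mathlib
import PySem

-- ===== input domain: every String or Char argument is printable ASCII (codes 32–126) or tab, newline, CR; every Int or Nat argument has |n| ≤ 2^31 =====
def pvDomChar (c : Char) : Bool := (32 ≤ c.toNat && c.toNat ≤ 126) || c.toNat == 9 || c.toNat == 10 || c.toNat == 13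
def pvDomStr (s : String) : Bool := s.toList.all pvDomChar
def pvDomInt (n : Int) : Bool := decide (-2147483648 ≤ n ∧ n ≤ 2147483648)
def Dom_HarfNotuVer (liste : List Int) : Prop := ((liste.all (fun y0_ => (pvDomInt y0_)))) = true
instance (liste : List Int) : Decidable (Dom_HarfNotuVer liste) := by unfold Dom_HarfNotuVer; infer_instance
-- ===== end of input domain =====

-- B replaces A's 6-way if/elif ladder by a bisect_left binary-search lookup into a sorted threshold table (idiomatic; same cost).

-- ===== PORT A =====
-- literal port of A: accumulator list, appended element by element through the branch ladder
def HarfNotuVer (liste : List Int) : List String :=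
  liste.foldl (fun newliste i =>
    if i > 90 then newliste ++ ["AA"]
    else if i > 75 then newliste ++ ["BB"]
    else if i > 60 then newliste ++ ["CC"]
    else if i > 45 then newliste ++ ["DD"]
    else if i > 30 then newliste ++ ["FD"]
    else newliste ++ ["FF"]) []

-- ===== PORT B =====
-- port of Python's bisect.bisect_left(a, x):
--   lo, hi = 0, len(a); while lo < hi: mid = (lo+hi)//2; if a[mid] < x: lo = mid+1 else: hi = mid; return lo
-- (the while loop becomes structural recursion on fuel = hi - lo, which bounds the iteration count)
def pvBisectLeftGo (a : List Int) (x : Int) : Nat → Nat → Nat → Nat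
  | 0, lo, _ => lo
  | fuel + 1, lo, hi =>
    if lo < hi then
      if a.getD ((lo + hi) / 2) 0 < x then pvBisectLeftGo a x fuel ((lo + hi) / 2 + 1) hi
      else pvBisectLeftGo a x fuel lo ((lo + hi) / 2)
    else lo

def pvBisectLeft (a : List Int) (x : Int) : Nat := pvBisectLeftGo a x a.length 0 a.length

def pvBounds : List Int := [30, 45, 60, 75, 90]
def pvLetters : List String := ["FF", "FD", "DD", "CC", "BB", "AA"]

def HarfNotuVer_alt (liste : List Int) : List String :=
  liste.map (fun i => pvLetters.getD (pvBisectLeft pvBounds i) "")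

-- ===== PRECONDITION & SPEC =====
def Spec_HarfNotuVer (liste : List Int) (out : List String) : Prop := out = HarfNotuVer_alt liste
instance (liste : List Int) (out : List String) : Decidable (Spec_HarfNotuVer liste out) := by unfold Spec_HarfNotuVer; infer_instance

-- ===== CLAIM (what is proved, stated in full; the proofs are below) =====
def Claim_equal_HarfNotuVer : Prop := ∀ (liste : List Int), Dom_HarfNotuVer liste → Spec_HarfNotuVer liste (HarfNotuVer liste)

-- ===== LEMMAS AND PROOFS =====

-- A's branch ladder as a single-element function
def pvLadder (i : Int) : String :=
  if i > 90 then "AA" else if i > 75 then "BB" else if i > 60 then "CC"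
  else if i > 45 then "DD" else if i > 30 then "FD" else "FF"

theorem pvBisectLeft_eval (x : Int) :
    pvLetters.getD (pvBisectLeft pvBounds x) "" = pvLadder x := by
  show pvLetters.getD (pvBisectLeftGo pvBounds x 5 0 5) "" = pvLadder x
  unfold pvLadder
  simp only [pvBisectLeftGo, pvBounds, List.getD, List.getElem?_cons_zero,
    List.getElem?_cons_succ, Option.getD_some]
  norm_num
  split_ifs <;> first | rfl | omega

theorem foldl_ladder (liste : List Int) (acc : List String) :
    liste.foldl (fun newliste i =>
      if i > 90 then newliste ++ ["AA"]
      else if i > 75 then newliste ++ ["BB"]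
      else if i > 60 then newliste ++ ["CC"]
      else if i > 45 then newliste ++ ["DD"]
      else if i > 30 then newliste ++ ["FD"]
      else newliste ++ ["FF"]) acc = acc ++ liste.map pvLadder := by
  induction liste generalizing acc with
  | nil => simp
  | cons y ys ih =>
    simp only [List.foldl, List.map]
    rw [ih]
    unfold pvLadder
    split_ifs <;> simp

-- ===== VERDICT (by name: the statement is the Claim_ definition above) =====
theorem HarfNotuVer_spec : Claim_equal_HarfNotuVer := by
  intro liste _
  unfold Spec_HarfNotuVer HarfNotuVer HarfNotuVer_alt
  rw [foldl_ladder]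
  simp only [List.nil_append, List.map_inj_left]
  intro a _
  exact (pvBisectLeft_eval a).symm
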